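/- GENERATED by mk_final_copies.py from the proof of the farm's unit `vorbis_decode_packet_rest.9` (farm:vorbis_decode_packet_rest.9.2: Proof.lean) as the
   re-elaboration sweep compiled it — do not edit. -/
/-
  UNIT vorbis_decode_packet_rest.9 (0x111559 – 0x1116aa, stb_vorbis_fixed.c:3331–3349): the residue loop. The segment is proved block by
  block, each block a lemma from one cut assertion to the next (Lemmas.lean: `entry_head`, `outer_head`, `inner_body`; here: `call_block`),
  and the two loops are the inductions `inner_loop` (measure `17 − j`, HD1) and `outer_loop` (measure `257 − i`, `Outer.i_le`):
      At9 —entry_head→ Outer 0 ;  Outer i —outer_head→ At10 | Inner i 0 0 ;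
      Inner i j ch —inner_body→ Inner i (j+1) ch | Inner i (j+1) (ch+1) | Inner@0x111658 i j ch —call_block→ Outer (i+1).
-/
import Asan.CheckWalk
import Vorbis.Spec.PacketRestFrame
import Vorbis.Spec.DecodeResidue
import Vorbis.Spec.Units.vorbis_decode_packet_rest_9
import Vorbis.Spec.Worked.vorbis_decode_packet_rest_9_Lemmas

open X86 X86.User Asan Vorbis Vorbis.Spec Vorbis.Spec.vorbis_decode_packet_rest

set_option maxRecDepth 4000
set_option maxHeartbeats 4000000

namespace Vorbis.Spec.vorbis_decode_packet_rest_9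

section s9

variable {u₀ : State} {others : List Obj} {frames : List (Nat × FrameLayout)} {len : Nat} {Ar : Arena}
  {stored room : Int} {mode : Nat} {ysz : Nat → Nat} {e : State} {ret : Word} {v : State}

/-- Segment .9, 0x111658 – 0x11168a (lines 3348–3349, 3331): `r = map->submap_residue[i]`, the call of decode_residue, `++i`. -/
theorem call_block {Lay : Layout} (hLay : Lay.hi = 0x1000000) {μ : Microarch} (hμ : UserX.MicroOK μ)
    (hcode : HasCodeNat Lay u₀ Vorbis.L.vorbis_decode_packet_rest.entry Vorbis.Code.code_vorbis_decode_packet_rest.nat Vorbis.L.vorbis_decode_packet_rest.size)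
    (h_load1 : Asan.SmallCheck Lay μ Vorbis.WayInv (Vorbis.CodeOK u₀) [.rax, .rdx] 1 Vorbis.L.__asan_load1_noabort.entry)
    (h_dr : Calls Lay μ Vorbis.WayInv (Vorbis.conv u₀) Vorbis.L.decode_residue.entry
      (Vorbis.Spec.decode_residue.spec len Ar others (framesIn frames e) stored room ysz))
    (i j ch : Nat) (v : State)
    (hat : Inner u₀ others frames len Ar stored room mode ysz e ret 0x111658 i j ch v) :
    ReachVia Lay μ Vorbis.WayInv v (fun w => Outer u₀ others frames len Ar stored room mode ysz e ret (i + 1) w) := by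
  have he := hat.entry
  v_entry he
  have w_rip := hat.rip
  have hrsp : v.reg .rsp = e.reg .rsp - 3000 := hat.rsp
  have w_eq : Mem.EqOn Vorbis.L.textLo Vorbis.L.textHi u₀.mem v.mem := hat.code
  have hdf : v.flags .df = false := (show abiInv _ from hat.abi).1
  have hmx : v.mxcsr &&& 0x1F80 = 0x1F80 := (show abiInv _ from hat.abi).2
  have hsse := Vorbis.sseOK_of_abiInv hat.abi
  have hf := hat.toStable.toFrame
  have hrbp := hat.rbp
  have hr13 := hat.r13
  have hfoff2 : (e.reg .rdi).toNat + 1808 ≤ 0xC00000 := (SpanOK.geom_obj hat.inv he_top).2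
  have hr12 : v.reg .r12 = addr (e.reg .rdi).toNat := eq_addr _ _ hat.r12
  have haf : (addr (e.reg .rdi).toNat).toNat = (e.reg .rdi).toNat := toNat_addr _ (by omega)
  have hC16 : nchan v.mem (fOf e) ≤ 16 := by
    have := hat.inv.config.header.HD1.2
    rw [nchan_def]
    omega
  have hjle := hat.j_le
  have hchle := hat.ch_le
  -- the mapping record
  obtain ⟨map, hmapdef⟩ : ∃ map, mapOf v.mem (fOf e) (mOf e) = map := ⟨_, rfl⟩
  have hr15n : (v.reg .r15).toNat = map := by
    rw [← hmapdef]
    exact hat.r15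
  have hr15 : v.reg .r15 = addr map := eq_addr _ _ hr15n
  obtain ⟨hmw1, hmw2, hmw3⟩ := s9_map_where hf he_room
  rw [hmapdef] at hmw1 hmw2 hmw3
  have ham : (addr map).toNat = map := toNat_addr _ (by omega)
  have hmp3 := (s9_map_ok hf he_room).MP3
  have hsub := hat.i_lt
  rw [hmapdef] at hmp3 hsub
  have hi16 : i < 16 := by omega
  obtain ⟨rn, hrndef⟩ : ∃ rn, Mapping.submap_residue v.mem map i = rn := ⟨_, rfl⟩
  have hrn : rn < 256 := by
    rw [← hrndef]
    simp only [vacc, voff]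
    exact Mem.u8_lt _ _
  have rrn : v.mem.readLE (addr map + UInt64.ofNat i + 33) 1 = rn := by
    have ea : addr map + UInt64.ofNat i + 33 = addr (map + 33 + i) := by
      apply eq_addr
      u_omega
    rw [ea]
    simp only [vacc, voff] at hrndef
    exact hrndef
  have hnr := nOf_range hat.inv.config.header.HD3 (mOf e)
  obtain ⟨n2, hn2def⟩ : ∃ n2, nOf v.mem (fOf e) (mOf e) / 2 = n2 := ⟨_, rfl⟩
  have hn2lt : n2 ≤ 4096 := by omega
  have hn2 : v.mem.readLE (e.reg .rsp - 2940) 4 = n2 := by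
    have := hat.slot_n2
    have ea : spOf e + 0x3c = e.reg .rsp - 2940 := by u_omega
    rw [← ea, ← hn2def]
    exact this
  have hsb0 : v.mem.readLE (e.reg .rsp - 2992) 8 = sbOf e := by
    have := hat.slot_sb8
    have ea : spOf e + 0x8 = e.reg .rsp - 2992 := by u_omega
    rw [← ea]
    exact this
  u_walk hcode [hμ.vendor, s9_zx8, cnt32_part i, cnt32_part ch, cnt32_sext_bv i (by omega)] until [Vorbis.L.vorbis_decode_packet_rest.loop8] span [Vorbis.L.textLo, Vorbis.L.textHi] side (v_side)
  · -- check_111660: `map->submap_residue[i]` (load1 at map + 33 + i)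
    have hun : ShadowUntouched v.mem s_111660.mem := by v_untouched
    exact s9_chk_map hf he_room hun _ (33 + i) 1 (by omega) (by omega) (by rw [hmapdef]; clear hmw3; u_omega)
  · v_inv
  · -- the precondition of decode_residue
    clear hmw3
    have hs : Mem.SameExcept (ownWins (e.reg .rsp).toNat) v.mem s_111685.mem := by
      rw [w_mem]
      unfold ownWins
      u_same
    have hrb : ∀ k, k < ch → s9_RB e v.mem s_111685.mem k := by
      intro k hk
      have hsa : (addr ((e.reg .rsp).toNat - 3000 + 320 + k)).toNat = (e.reg .rsp).toNat - 3000 + 320 + k :=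
        toNat_addr _ (by omega)
      have hsb : (addr ((e.reg .rsp).toNat - 3000 + 160 + 8 * k)).toNat = (e.reg .rsp).toNat - 3000 + 160 + 8 * k :=
        toNat_addr _ (by omega)
      refine s9_RB_keep (hat.rb k hk) ?_ ?_
      · intro x hx
        rw [w_mem]
        u_read
      · intro x hx
        rw [w_mem]
        u_read
    have hpre0 : DecodeResidue.Pre len Ar others (framesIn frames e) stored room ysz s_111685 := by
      refine s9_dr_pre hat hs hrb ?_ ?_ ?_ ?_ ?_ ?_ ?_
      · rw [w_rsp]
        u_omega
      · rw [w_rdi]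
        exact haf
      · rw [w_rsi]
        u_omega
      · rw [w_r9]
        u_omega
      · rw [w_rdx, cnt32_ofBV _ (by omega), UInt64.toNat_ofNat']
        omega
      · rw [w_rcx, cnt32_ofBV _ (by omega), UInt64.toNat_ofNat', hn2def]
        omega
      · rw [w_r8, UInt64.toNat_ofNat', hmapdef, hrndef]
        omega
    exact hpre0
  · -- 0x11168a, after the return of decode_residue: STABLE again, `++i`, to the head of the submap loop
    clear hmw3
    have hs : Mem.SameExcept (ownWins (e.reg .rsp).toNat) v.mem s_111685.mem := by
      rw [w_mem_111685]
      unfold ownWins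
      u_same
    have hrb : ∀ k, k < ch → s9_RB e v.mem s_111685.mem k := by
      intro k hk
      have hsa : (addr ((e.reg .rsp).toNat - 3000 + 320 + k)).toNat = (e.reg .rsp).toNat - 3000 + 320 + k :=
        toNat_addr _ (by omega)
      have hsb : (addr ((e.reg .rsp).toNat - 3000 + 160 + 8 * k)).toNat = (e.reg .rsp).toNat - 3000 + 160 + 8 * k :=
        toNat_addr _ (by omega)
      refine s9_RB_keep (hat.rb k hk) ?_ ?_
      · intro x hx
        rw [w_mem_111685]
        u_read
      · intro x hx
        rw [w_mem_111685]
        u_read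
    have hpre0 : DecodeResidue.Pre len Ar others (framesIn frames e) stored room ysz s_111685 := by
      refine s9_dr_pre hat hs hrb ?_ ?_ ?_ ?_ ?_ ?_ ?_
      · rw [w_rsp_111685]
        u_omega
      · rw [w_rdi_111685]
        exact haf
      · rw [w_rsi_111685]
        u_omega
      · rw [w_r9_111685]
        u_omega
      · rw [w_rdx_111685, cnt32_ofBV _ (by omega), UInt64.toNat_ofNat']
        omega
      · rw [w_rcx_111685, cnt32_ofBV _ (by omega), UInt64.toNat_ofNat', hn2def]
        omega
      · rw [w_r8_111685, UInt64.toNat_ofNat', hmapdef, hrndef]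
        omega
    have hsame0 := w_same
    have hpost0 : DecodeResidue.Post len Ar others (framesIn frames e) stored room ysz s_111685 s_111685r := w_post
    have hcrsp : s_111685.reg .rsp = spOf e - 8 := by
      rw [w_rsp_111685]
      u_omega
    have hcrdi : (s_111685.reg .rdi).toNat = fOf e := by
      rw [w_rdi_111685]
      exact haf
    have hrsp_r : s_111685r.reg .rsp = spOf e := w_rsp
    have hcode_r : Vorbis.CodeOK u₀ s_111685r.mem := Vorbis.conv_code_eqOn w_code
    have habi_r : abiInv s_111685r := w_inv
    obtain ⟨hst_r, cmap_r⟩ := stable_call hat.toStable hs hcrsp hcrdi hpre0 hsame0 hpost0 hrsp_r hcode_r habi_r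
    have hsb_r : s_111685r.mem.readLE (e.reg .rsp - 2992) 8 = sbOf e := by
      rw [callee_read hpre0 hsame0 _ _ (by rw [w_rsp_111685]; u_omega) (by u_omega) (by u_omega), w_mem_111685]
      u_read
    v_after_call w_rsp_111685 w_mem_111685
    u_walk hcode [hμ.vendor, cnt32_part i] until [Vorbis.L.vorbis_decode_packet_rest.loop8] span [Vorbis.L.textLo, Vorbis.L.textHi] side (v_side)
    have hs2 : Mem.SameExcept (ownWins (e.reg .rsp).toNat) s_111685r.mem s_11168a.mem := by
      rw [w_mem]
      exact Mem.SameExcept.refl _ _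
    have habi2 : abiInv s_11168a := by v_inv
    obtain ⟨hst2, -, cmap2, -⟩ := stable_own hst_r hs2 w_rsp w_eq habi2
    have h15 : (s_11168a.reg .r15).toNat = mapOf s_11168a.mem (fOf e) (mOf e) := by
      rw [w_kept .r15 rfl, cmap2, cmap_r]
      exact hat.r15
    have h12 : (s_11168a.reg .r12).toNat = fOf e := by
      rw [w_kept .r12 rfl]
      exact hat.r12
    have hsb : slot64 e s_11168a 0x8 = sbOf e := by
      show s_11168a.mem.readLE (spOf e + 0x8) 8 = _
      have ea : spOf e + 0x8 = e.reg .rsp - 2992 := by u_omega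
      rw [ea, w_mem]
      exact hsb_r
    have hbp : s_11168a.reg .rbp = UInt64.ofNat (i + 1) := by
      rw [w_rbp, cnt32_succ_bv, cnt32_ofBV _ (by omega)]
    exact ReachVia.done ⟨hst2, w_rip, h15, h12, hsb, hbp, by omega⟩


/-- **The channel loop** (0x1115cb, line 3336): from its head with the counters `j`, `ch` the machine reaches the head of the
submap loop with `i + 1` (through the call of decode_residue). Measure `17 − j`: `Inner.j_le` and HD1 give `j ≤ 16`. -/
theorem inner_loop {Lay : Layout} (hLay : Lay.hi = 0x1000000) {μ : Microarch} (hμ : UserX.MicroOK μ)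
    (hcode : HasCodeNat Lay u₀ Vorbis.L.vorbis_decode_packet_rest.entry Vorbis.Code.code_vorbis_decode_packet_rest.nat Vorbis.L.vorbis_decode_packet_rest.size)
    (h_store1 : Asan.SmallCheck Lay μ Vorbis.WayInv (Vorbis.CodeOK u₀) [.rax, .rdx] 1 Vorbis.L.__asan_store1_noabort.entry)
    (h_load8 : Asan.SmallCheck Lay μ Vorbis.WayInv (Vorbis.CodeOK u₀) [.rax, .rcx, .rdx] 8 Vorbis.L.__asan_load8_noabort.entry)
    (h_store8 : Asan.SmallCheck Lay μ Vorbis.WayInv (Vorbis.CodeOK u₀) [.rax, .rcx, .rdx] 8 Vorbis.L.__asan_store8_noabort.entry)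
    (h_load4 : Asan.SmallCheck Lay μ Vorbis.WayInv (Vorbis.CodeOK u₀) [.rax, .rcx, .rdx] 4 Vorbis.L.__asan_load4_noabort.entry)
    (h_load1 : Asan.SmallCheck Lay μ Vorbis.WayInv (Vorbis.CodeOK u₀) [.rax, .rdx] 1 Vorbis.L.__asan_load1_noabort.entry)
    (h_dr : Calls Lay μ Vorbis.WayInv (Vorbis.conv u₀) Vorbis.L.decode_residue.entry
      (Vorbis.Spec.decode_residue.spec len Ar others (framesIn frames e) stored room ysz))
    (i : Nat) :
    ∀ (k j ch : Nat), j + k = 17 → ∀ w,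
      Inner u₀ others frames len Ar stored room mode ysz e ret Vorbis.L.vorbis_decode_packet_rest.loop7 i j ch w →
      ReachVia Lay μ Vorbis.WayInv w (fun w' => Outer u₀ others frames len Ar stored room mode ysz e ret (i + 1) w') := by
  intro k
  induction k with
  | zero =>
    intro j ch hj w hat
    have h16 := hat.inv.config.header.HD1.2
    have hjle := hat.j_le
    rw [nchan_def] at hjle
    omega
  | succ k ih =>
    intro j ch hj w hat
    refine (inner_body hLay hμ hcode h_store1 h_load8 h_store8 h_load4 h_load1 i j ch w hat).trans ?_
    intro w' hw'
    rcases hw' with a | a | a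
    · exact call_block hLay hμ hcode h_load1 h_dr i j ch w' a
    · exact ih (j + 1) ch (by omega) w' a
    · exact ih (j + 1) (ch + 1) (by omega) w' a

/-- **The submap loop** (0x11168d, line 3331): from its head with the counter `i` the machine reaches the entry of segment .10.
Measure `257 − i` (`Outer.i_le`; the loop is left at `i = submaps ≤ 16`). -/
theorem outer_loop {Lay : Layout} (hLay : Lay.hi = 0x1000000) {μ : Microarch} (hμ : UserX.MicroOK μ)
    (hcode : HasCodeNat Lay u₀ Vorbis.L.vorbis_decode_packet_rest.entry Vorbis.Code.code_vorbis_decode_packet_rest.nat Vorbis.L.vorbis_decode_packet_rest.size)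
    (h_store1 : Asan.SmallCheck Lay μ Vorbis.WayInv (Vorbis.CodeOK u₀) [.rax, .rdx] 1 Vorbis.L.__asan_store1_noabort.entry)
    (h_load8 : Asan.SmallCheck Lay μ Vorbis.WayInv (Vorbis.CodeOK u₀) [.rax, .rcx, .rdx] 8 Vorbis.L.__asan_load8_noabort.entry)
    (h_store8 : Asan.SmallCheck Lay μ Vorbis.WayInv (Vorbis.CodeOK u₀) [.rax, .rcx, .rdx] 8 Vorbis.L.__asan_store8_noabort.entry)
    (h_load4 : Asan.SmallCheck Lay μ Vorbis.WayInv (Vorbis.CodeOK u₀) [.rax, .rcx, .rdx] 4 Vorbis.L.__asan_load4_noabort.entry)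
    (h_load1 : Asan.SmallCheck Lay μ Vorbis.WayInv (Vorbis.CodeOK u₀) [.rax, .rdx] 1 Vorbis.L.__asan_load1_noabort.entry)
    (h_dr : Calls Lay μ Vorbis.WayInv (Vorbis.conv u₀) Vorbis.L.decode_residue.entry
      (Vorbis.Spec.decode_residue.spec len Ar others (framesIn frames e) stored room ysz)) :
    ∀ (k i : Nat), i + k = 257 → ∀ w, Outer u₀ others frames len Ar stored room mode ysz e ret i w →
      ReachVia Lay μ Vorbis.WayInv w (fun w' => At10 u₀ others frames len Ar stored room mode ysz e ret w') := by
  intro k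
  induction k with
  | zero =>
    intro i hi w hat
    have hile := hat.i_le
    omega
  | succ k ih =>
    intro i hi w hat
    refine (outer_head hLay hμ hcode h_load1 i w hat).trans ?_
    intro w' hw'
    rcases hw' with a | a
    · exact ReachVia.done a
    · refine (inner_loop hLay hμ hcode h_store1 h_load8 h_store8 h_load4 h_load1 h_dr i 17 0 0 rfl w' a).trans ?_
      intro w'' o
      exact ih (i + 1) (by omega) w'' o

end s9

end Vorbis.Spec.vorbis_decode_packet_rest_9

/-- Segment 9 of `vorbis_decode_packet_rest` (0x111559 … 0x1116aa): the residue loop, from `At9` to `At10`. -/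
theorem Vorbis.Spec.Worked.vorbis_decode_packet_rest_9_ok : Vorbis.Spec.vorbis_decode_packet_rest_9.Statement := by
  unfold Vorbis.Spec.vorbis_decode_packet_rest_9.Statement
  intro Lay hLay μ hμ u₀ hcode h_store1 h_load8 h_store8 h_load4 h_load1 h_dr
  intro others frames len Ar stored room mode ysz u ret v hat
  have hdr := h_dr len Ar others (framesIn frames u) stored room ysz
  refine (Vorbis.Spec.vorbis_decode_packet_rest_9.entry_head hLay hμ hcode others frames len Ar stored room mode ysz u ret v
    hat).trans ?_
  intro w ho
  exact Vorbis.Spec.vorbis_decode_packet_rest_9.outer_loop hLay hμ hcode h_store1 h_load8 h_store8 h_load4 h_load1 hdr 257 0 rfl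
    w ho
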